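-- pv_equiv track=rewrite | github.com/rlankin/advent-of-code | 2015/day15.py | get_score_1
-- ===== SOURCE A (Python) =====
-- from functools import reduce
--
-- def get_score_1(ing, scores, tbsp):
--     score = 0
--
--     if not ing:
--         if tbsp == 100 and all([True if s > 0 else False for s in scores[:-1]]):
--             score = reduce(lambda x, y: x * y, scores[:-1])
--     else:
--         for a in range(101):
--             if tbsp + a > 100:
--                 break
--
--             new_scores = []
--             for i, p in enumerate(ing[0][1]):
--                 new_scores.append(scores[i] + (p * a))
--
--             new_score = get_score_1(ing[1:], new_scores, tbsp + a)
--             if new_score > score: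
--                 score = new_score
--
--     return score
-- ===== SOURCE B (Python) =====
-- from functools import reduce
--
--
-- def _compositions(total, k):
--     """All k-tuples of ints in [0, 100] summing to total (total >= 0)."""
--     if k == 1:
--         return [(total,)] if total <= 100 else []
--     out = []
--     for a in range(min(total, 100) + 1):
--         for rest in _compositions(total - a, k - 1):
--             out.append((a,) + rest)
--     return out
--
--
-- def get_score_1(ing, scores, tbsp):
--     k = len(ing)
--     if k == 0:
--         if tbsp == 100 and all(s > 0 for s in scores[:-1]):
--             return reduce(lambda x, y: x * y, scores[:-1])
--         return 0
--     rem = 100 - tbsp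
--     if rem < 0 or rem > 100 * k:
--         return 0
--     props = [p for _, p in ing]
--     m = len(ing[-1][1])
--     best = 0
--     for parts in _compositions(rem, k):
--         totals = [scores[j] + sum(parts[i] * props[i][j] for i in range(k))
--                   for j in range(m)]
--         if all(t > 0 for t in totals[:-1]):
--             prod = 1
--             for t in totals[:-1]:
--                 prod *= t
--             if prod > best:
--                 best = prod
--     return best
-- ===== Notes on version B (the rewrite author's own statement) =====
-- stated objective: alternative
-- what changed: Replaces A's per-level recursion that threads updated score vectors and a break-on-overshoot loop with a stars-and-bars style enumeration of exact compositions of the remaining 100-tbsp teaspoons into len(ing) parts (with an up-front infeasibility check rem<0 or rem>100*k), scoring each composition in one pass by the direct dot products scores[j]+sum_i a_i*props[i][j].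
import Mathlib
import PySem

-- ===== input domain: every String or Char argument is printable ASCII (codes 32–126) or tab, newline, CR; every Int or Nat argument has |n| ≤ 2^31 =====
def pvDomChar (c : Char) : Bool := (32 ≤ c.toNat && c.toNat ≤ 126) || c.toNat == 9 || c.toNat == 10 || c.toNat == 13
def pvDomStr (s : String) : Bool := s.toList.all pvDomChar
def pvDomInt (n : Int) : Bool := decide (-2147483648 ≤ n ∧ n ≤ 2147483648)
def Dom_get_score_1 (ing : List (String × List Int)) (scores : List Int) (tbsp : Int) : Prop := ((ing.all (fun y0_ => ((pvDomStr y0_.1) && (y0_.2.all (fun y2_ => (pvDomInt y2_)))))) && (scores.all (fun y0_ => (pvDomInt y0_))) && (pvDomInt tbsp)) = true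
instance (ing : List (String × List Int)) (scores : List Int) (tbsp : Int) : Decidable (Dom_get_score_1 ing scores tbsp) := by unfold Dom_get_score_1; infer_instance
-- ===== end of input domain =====

-- B replaces A's per-level recursion (threading updated score vectors through a break-on-overshoot
-- loop) with an enumeration of exact compositions of the remaining teaspoons, scoring each by direct
-- dot products; objective: alternative decomposition (no speed claim).

-- ===== PORT A =====
def get_score_1 (ing : List (String × List Int)) (scores : List Int) (tbsp : Int) : Int :=
  match ing with
  | [] =>
    if tbsp = 100 ∧ (PySem.List.slice scores none (some (-1))).all (fun s => decide (s > 0)) then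
      -- reduce(mul, scores[:-1]); the [] case is Python's TypeError, excluded by Pre_
      match PySem.List.slice scores none (some (-1)) with
      | [] => 0
      | x :: ys => ys.foldl (fun acc y => acc * y) x
    else 0
  | hd :: rest =>
    ((PySem.List.pyRange 0 101 1).foldl
      (fun st a =>
        if st.2 then st
        else if tbsp + a > 100 then (st.1, true)
        else
          let new_scores := (PySem.List.enumerate hd.2 0).map
            (fun ip => PySem.List.pyGetD scores ip.1 0 + ip.2 * a)
          let new_score := get_score_1 rest new_scores (tbsp + a)
          ((if new_score > st.1 then new_score else st.1), false))
      ((0 : Int), false)).1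
termination_by ing

-- ===== PORT B =====
-- helper _compositions of Source B: all k-tuples of ints in [0,100] summing to total (callers pass k ≥ 1)
def compositions (total : Int) (k : Nat) : List (List Int) :=
  match k with
  | 0 => []
  | 1 => if total ≤ 100 then [[total]] else []
  | Nat.succ (Nat.succ k') =>
    (PySem.List.pyRange 0 (min total 100 + 1) 1).foldl
      (fun out a => out ++ (compositions (total - a) (k' + 1)).map (fun rest => a :: rest)) []
termination_by k

def get_score_1_alt (ing : List (String × List Int)) (scores : List Int) (tbsp : Int) : Int :=
  let k := ing.length
  if k = 0 then
    if tbsp = 100 ∧ (PySem.List.slice scores none (some (-1))).all (fun s => decide (s > 0)) then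
      -- reduce(mul, scores[:-1]); the [] case is Python's TypeError, excluded by Pre_
      match PySem.List.slice scores none (some (-1)) with
      | [] => 0
      | x :: ys => ys.foldl (fun acc y => acc * y) x
    else 0
  else
    let rem := 100 - tbsp
    if rem < 0 ∨ rem > 100 * (k : Int) then 0
    else
      let props := ing.map (fun p => p.2)
      let m := (PySem.List.pyGetD ing (-1) ("", [])).2.length
      (compositions rem k).foldl
        (fun best parts =>
          let totals := (PySem.List.pyRange 0 (m : Int) 1).map
            (fun j => PySem.List.pyGetD scores j 0 +
              ((PySem.List.pyRange 0 (k : Int) 1).map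
                (fun i => PySem.List.pyGetD parts i 0 *
                  PySem.List.pyGetD (PySem.List.pyGetD props i []) j 0)).sum)
          if (PySem.List.slice totals none (some (-1))).all (fun t => decide (t > 0)) then
            let prod := (PySem.List.slice totals none (some (-1))).foldl (fun acc y => acc * y) 1
            if prod > best then prod else best
          else best)
        0

-- ===== PRECONDITION & SPEC =====
-- Pre_ excludes exactly the inputs where A raises: IndexError when a property list is longer than the
-- current scores vector (reached whenever tbsp ≤ 100), and TypeError (reduce of an empty list) when a
-- leaf with total 100 is reachable and the final property list (or scores, if ing = []) has length ≤ 1.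
def Pre_get_score_1 (ing : List (String × List Int)) (scores : List Int) (tbsp : Int) : Prop :=
  (tbsp ≤ 100 → ing ≠ [] →
     ((ing.head?.map (fun h => h.2.length)).getD 0 ≤ scores.length ∧
      List.IsChain (fun x y => y.2.length ≤ x.2.length) ing)) ∧
  (ing = [] → tbsp = 100 → 2 ≤ scores.length) ∧
  (ing ≠ [] → 100 - 100 * (ing.length : Int) ≤ tbsp → tbsp ≤ 100 →
     2 ≤ (ing.getLast?.map (fun h => h.2.length)).getD 0)
instance (ing : List (String × List Int)) (scores : List Int) (tbsp : Int) : Decidable (Pre_get_score_1 ing scores tbsp) := by unfold Pre_get_score_1; infer_instance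

def pvWitness_get_score_1 : (List (String × List Int)) × List Int × Int :=
  ([("a", [1, 2]), ("b", [1, 1])], [0, 0], 98)

def Spec_get_score_1 (ing : List (String × List Int)) (scores : List Int) (tbsp : Int) (out : Int) : Prop := out = get_score_1_alt ing scores tbsp
instance (ing : List (String × List Int)) (scores : List Int) (tbsp : Int) (out : Int) : Decidable (Spec_get_score_1 ing scores tbsp out) := by unfold Spec_get_score_1; infer_instance

-- ===== CLAIM (what is proved, stated in full; the proofs are below) =====
def Claim_equal_get_score_1 : Prop := ∀ (ing : List (String × List Int)) (scores : List Int) (tbsp : Int), Dom_get_score_1 ing scores tbsp → Pre_get_score_1 ing scores tbsp → Spec_get_score_1 ing scores tbsp (get_score_1 ing scores tbsp)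

-- ===== LEMMAS AND PROOFS =====

-- max-fold: the `if v > acc then v else acc` accumulator both programs use
def mfold {α : Type} (f : α → Int) (s : Int) (l : List α) : Int :=
  l.foldl (fun acc x => if f x > acc then f x else acc) s

lemma mfold_cons {α : Type} (f : α → Int) (s : Int) (a : α) (l : List α) :
    mfold f s (a :: l) = mfold f (if f a > s then f a else s) l := rfl

lemma mfold_nil {α : Type} (f : α → Int) (s : Int) : mfold f s [] = s := rfl

-- A's loop body, with the recursive call abstracted as f
def stepA (f : Int → Int) (tbsp : Int) : (Int × Bool) → Int → (Int × Bool) :=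
  fun st a =>
    if st.2 then st
    else if tbsp + a > 100 then (st.1, true)
    else ((if f a > st.1 then f a else st.1), false)

-- updated scores vector of one level of A
def updS (scores props : List Int) (a : Int) : List Int :=
  (PySem.List.enumerate props 0).map (fun ip => PySem.List.pyGetD scores ip.1 0 + ip.2 * a)

-- the per-property totals B computes for one composition (kn is the k of Source B, = props.length in use)
def totalsB (scores : List Int) (props : List (List Int)) (kn m : Nat) (parts : List Int) : List Int :=
  (PySem.List.pyRange 0 (m : Int) 1).map
    (fun j => PySem.List.pyGetD scores j 0 +
      ((PySem.List.pyRange 0 ((kn : Nat) : Int) 1).map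
        (fun i => PySem.List.pyGetD parts i 0 *
          PySem.List.pyGetD (PySem.List.pyGetD props i []) j 0)).sum)

-- B's candidate value for one composition
def gvalB (scores : List Int) (props : List (List Int)) (kn m : Nat) (parts : List Int) : Int :=
  let totals := totalsB scores props kn m parts
  if (PySem.List.slice totals none (some (-1))).all (fun t => decide (t > 0)) then
    (PySem.List.slice totals none (some (-1))).foldl (fun acc y => acc * y) 1
  else 0

lemma A_cons (hd : String × List Int) (tl : List (String × List Int)) (scores : List Int) (tbsp : Int) :
    get_score_1 (hd :: tl) scores tbsp =
      ((PySem.List.pyRange 0 101 1).foldl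
        (stepA (fun a => get_score_1 tl (updS scores hd.2 a) (tbsp + a)) tbsp) ((0 : Int), false)).1 := by
  conv_lhs => unfold get_score_1
  congr 2

lemma bf1 (f : Int → Int) (tbsp : Int) (l : List Int) (s : Int) :
    l.foldl (stepA f tbsp) (s, true) = (s, true) := by
  induction l with
  | nil => rfl
  | cons a l ih => simpa [stepA] using ih

lemma bf2 (f : Int → Int) (tbsp : Int) (l : List Int) (s : Int) :
    (l.foldl (stepA f tbsp) (s, false)).1 =
      mfold f s (l.takeWhile (fun a => decide (tbsp + a ≤ 100))) := by
  induction l generalizing s with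
  | nil => rfl
  | cons a l ih =>
    by_cases h : tbsp + a ≤ 100
    · have hng : ¬ (tbsp + a > 100) := by omega
      rw [List.takeWhile_cons_of_pos (by simpa using h), mfold_cons, List.foldl_cons,
        show stepA f tbsp (s, false) a = ((if f a > s then f a else s), false) by
          simp [stepA, hng]]
      exact ih _
    · have hg : tbsp + a > 100 := by omega
      rw [List.takeWhile_cons_of_neg (by simpa using h), List.foldl_cons,
        show stepA f tbsp (s, false) a = (s, true) by simp [stepA, hg], bf1]
      rfl

lemma tw_chunk (tbsp : Int) : ∀ (n : Nat) (a b : Int), (b - a).toNat = n →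
    (PySem.List.pyRange a b 1).takeWhile (fun x => decide (tbsp + x ≤ 100)) =
      PySem.List.pyRange a (min b (101 - tbsp)) 1 := by
  intro n
  induction n with
  | zero =>
    intro a b h
    rw [PySem.List.pyRange_one_eq_nil (by omega), List.takeWhile_nil,
      PySem.List.pyRange_one_eq_nil (by omega)]
  | succ n ih =>
    intro a b h
    rw [PySem.List.pyRange_one_cons (by omega)]
    by_cases hp : tbsp + a ≤ 100
    · rw [List.takeWhile_cons_of_pos (by simpa using hp), ih (a + 1) b (by omega)]
      exact (PySem.List.pyRange_one_cons (by omega)).symm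
    · rw [List.takeWhile_cons_of_neg (by simpa using hp),
        PySem.List.pyRange_one_eq_nil (by omega)]

lemma tw_neg (tbsp : Int) (h : 100 - tbsp < 0) :
    (PySem.List.pyRange 0 101 1).takeWhile (fun a => decide (tbsp + a ≤ 100)) = [] := by
  rw [tw_chunk tbsp ((101 - 0 : Int)).toNat 0 101 rfl]
  exact PySem.List.pyRange_one_eq_nil (by omega)

lemma tw_nonneg (tbsp : Int) (h : 0 ≤ 100 - tbsp) :
    (PySem.List.pyRange 0 101 1).takeWhile (fun a => decide (tbsp + a ≤ 100)) =
      PySem.List.pyRange 0 (min (100 - tbsp) 100 + 1) 1 := by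
  rw [tw_chunk tbsp ((101 - 0 : Int)).toNat 0 101 rfl]
  congr 1
  omega

lemma mfold_max {α : Type} (f : α → Int) (s t : Int) (l : List α) :
    mfold f (max s t) l = max s (mfold f t l) := by
  induction l generalizing t with
  | nil => rfl
  | cons a l ih =>
    rw [mfold_cons, mfold_cons]
    have h1 : (if f a > max s t then f a else max s t) = max s (if f a > t then f a else t) := by
      omega
    rw [h1]
    exact ih _

lemma mfold_init {α : Type} (f : α → Int) (s : Int) (l : List α) (hs : 0 ≤ s) :
    mfold f s l = max s (mfold f 0 l) := by
  have := mfold_max f s 0 l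
  rwa [max_eq_left hs] at this

lemma mfold_zero {α : Type} (f : α → Int) (l : List α) (h : ∀ x ∈ l, f x = 0) :
    mfold f 0 l = 0 := by
  induction l with
  | nil => rfl
  | cons a l ih =>
    rw [mfold_cons, h a (List.mem_cons_self), if_neg (by omega)]
    exact ih (fun x hx => h x (List.mem_cons_of_mem _ hx))

lemma mfold_append {α : Type} (f : α → Int) (s : Int) (l1 l2 : List α) :
    mfold f s (l1 ++ l2) = mfold f (mfold f s l1) l2 := by
  simp [mfold, List.foldl_append]

lemma mfold_map {α β : Type} (f : β → Int) (g : α → β) (s : Int) (l : List α) :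
    mfold f s (l.map g) = mfold (fun x => f (g x)) s l := by
  simp [mfold, List.foldl_map]

lemma mfold_congr {α : Type} {f g : α → Int} (s : Int) (l : List α)
    (h : ∀ x ∈ l, f x = g x) : mfold f s l = mfold g s l := by
  induction l generalizing s with
  | nil => rfl
  | cons a l ih =>
    rw [mfold_cons, mfold_cons, h a (List.mem_cons_self)]
    exact ih _ (fun x hx => h x (List.mem_cons_of_mem _ hx))

lemma mfold_flatMap {α β : Type} (f : β → Int) (g : α → List β) (s : Int) (l : List α) :
    mfold f s (l.flatMap g) = l.foldl (fun acc a => mfold f acc (g a)) s := by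
  induction l generalizing s with
  | nil => rfl
  | cons a l ih => rw [List.flatMap_cons, mfold_append, List.foldl_cons, ih]

lemma chain_last_le : ∀ (l : List (String × List Int)) (x : String × List Int),
    List.IsChain (fun p q : String × List Int => q.2.length ≤ p.2.length) (x :: l) →
    ((x :: l).getLast?.map (fun h => h.2.length)).getD 0 ≤ x.2.length := by
  intro l
  induction l with
  | nil => intro x _; simp
  | cons y t ih =>
    intro x h
    rw [List.isChain_cons_cons] at h
    calc ((x :: y :: t).getLast?.map (fun h => h.2.length)).getD 0
        = ((y :: t).getLast?.map (fun h => h.2.length)).getD 0 := by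
          rw [List.getLast?_cons_cons]
      _ ≤ y.2.length := ih y h.2
      _ ≤ x.2.length := h.1

-- fold congruence carrying a state invariant
lemma foldl_inv_congr {α β : Type} (P : β → Prop) (f g : β → α → β) (init : β) (l : List α)
    (h0 : P init)
    (h : ∀ b a, a ∈ l → P b → f b a = g b a ∧ P (g b a)) :
    l.foldl f init = l.foldl g init := by
  induction l generalizing init with
  | nil => rfl
  | cons a l ih =>
    have h1 := h init a (List.mem_cons_self) h0
    rw [List.foldl_cons, List.foldl_cons, h1.1]
    exact ih (g init a) h1.2 (fun b x hx hb => h b x (List.mem_cons_of_mem _ hx) hb)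

lemma A_zero (ing : List (String × List Int)) (scores : List Int) (tbsp : Int)
    (h : tbsp + 100 * (ing.length : Int) < 100) :
    get_score_1 ing scores tbsp = 0 := by
  induction ing generalizing scores tbsp with
  | nil =>
    unfold get_score_1
    rw [if_neg]
    rintro ⟨h1, -⟩
    simp at h
    omega
  | cons hd tl ih =>
    rw [A_cons, bf2]
    apply mfold_zero
    intro a ha
    have ha' : a ∈ PySem.List.pyRange 0 101 1 := (List.takeWhile_sublist _).mem ha
    rw [PySem.List.mem_pyRange_one] at ha'
    apply ih
    simp only [List.length_cons] at h
    push_cast at h ⊢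
    omega

lemma A_neg (hd : String × List Int) (tl : List (String × List Int)) (scores : List Int) (tbsp : Int)
    (h : 100 - tbsp < 0) : get_score_1 (hd :: tl) scores tbsp = 0 := by
  rw [A_cons, bf2, tw_neg tbsp h]
  rfl

lemma updS_eq (scores props : List Int) (a : Int) :
    updS scores props a =
      (List.range props.length).map (fun j => scores.getD j 0 + props.getD j 0 * a) := by
  rw [updS, PySem.List.enumerate_eq_map_pyRange (d := 0), List.map_map,
    PySem.List.pyRange_one, List.map_map]
  simp only [sub_zero]
  apply List.map_congr_left
  intro k hk
  simp only [Function.comp, zero_add, PySem.List.pyGetD_natCast]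

lemma length_updS (scores props : List Int) (a : Int) :
    (updS scores props a).length = props.length := by
  rw [updS_eq, List.length_map, List.length_range]

-- ('Int.toNat_natCast' kept out: simp closes these via sub_zero alone)
lemma totalsB_eq (scores : List Int) (props : List (List Int)) (kn m : Nat) (parts : List Int) :
    totalsB scores props kn m parts =
      (List.range m).map (fun j => scores.getD j 0 +
        ((List.range kn).map
          (fun i => parts.getD i 0 * (props.getD i []).getD j 0)).sum) := by
  unfold totalsB
  rw [PySem.List.pyRange_one 0 (m : Int), PySem.List.pyRange_one 0 ((kn : Nat) : Int)]
  simp only [sub_zero, Int.toNat_natCast, List.map_map]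
  apply List.map_congr_left
  intro j hj
  simp only [Function.comp_def, zero_add, PySem.List.pyGetD_natCast]

lemma totalsB_shift (scores : List Int) (p : List Int) (ps : List (List Int)) (kn m : Nat)
    (a : Int) (parts : List Int) (hm : m ≤ p.length) (_hs : p.length ≤ scores.length) :
    totalsB scores (p :: ps) (kn + 1) m (a :: parts) = totalsB (updS scores p a) ps kn m parts := by
  rw [totalsB_eq, totalsB_eq]
  apply List.map_congr_left
  intro j hj
  rw [List.mem_range] at hj
  have hupd : (updS scores p a).getD j 0 = scores.getD j 0 + p.getD j 0 * a := by
    rw [updS_eq, List.getD_eq_getElem?_getD, List.getElem?_map,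
      List.getElem?_range (by omega : j < p.length)]
    simp
  rw [hupd, List.range_succ_eq_map, List.map_cons, List.map_map, List.sum_cons]
  simp only [Function.comp_def, Nat.succ_eq_add_one, List.getD_cons_zero, List.getD_cons_succ]
  ring

lemma totalsB_nil (scores : List Int) (m : Nat) (hm : m = scores.length) :
    totalsB scores [] 0 m [] = scores := by
  subst hm
  rw [totalsB_eq]
  simp only [List.range_zero, List.map_nil, List.sum_nil, add_zero]
  apply List.ext_getElem (by simp)
  intro i h1 h2
  simp [List.getD_eq_getElem?_getD, List.getElem?_eq_getElem h2]

-- compositions (k ≥ 2) as a flatMap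
lemma compositions_succ (total : Int) (k : Nat) (hk : 1 ≤ k) :
    compositions total (k + 1) =
      (PySem.List.pyRange 0 (min total 100 + 1) 1).flatMap
        (fun a => (compositions (total - a) k).map (fun rest => a :: rest)) := by
  obtain ⟨k', rfl⟩ : ∃ k', k = k' + 1 := ⟨k - 1, by omega⟩
  conv_lhs => unfold compositions
  rw [PySem.List.foldl_append_eq_flatMap, List.nil_append]

-- B's fold equals the mfold of gvalB
lemma B_fold (scores : List Int) (props : List (List Int)) (kn m : Nat) (l : List (List Int))
    (best : Int) (hb : 0 ≤ best) :
    l.foldl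
      (fun best parts =>
        let totals := (PySem.List.pyRange 0 (m : Int) 1).map
          (fun j => PySem.List.pyGetD scores j 0 +
            ((PySem.List.pyRange 0 ((kn : Nat) : Int) 1).map
              (fun i => PySem.List.pyGetD parts i 0 *
                PySem.List.pyGetD (PySem.List.pyGetD props i []) j 0)).sum)
        if (PySem.List.slice totals none (some (-1))).all (fun t => decide (t > 0)) then
          let prod := (PySem.List.slice totals none (some (-1))).foldl (fun acc y => acc * y) 1
          if prod > best then prod else best
        else best) best
      = mfold (gvalB scores props kn m) best l := by
  have hstep : ∀ (b : Int) (parts : List Int), 0 ≤ b →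
      (if (PySem.List.slice (totalsB scores props kn m parts) none (some (-1))).all
            (fun t => decide (t > 0)) then
         (if (PySem.List.slice (totalsB scores props kn m parts) none (some (-1))).foldl
              (fun acc y => acc * y) 1 > b then
            (PySem.List.slice (totalsB scores props kn m parts) none (some (-1))).foldl
              (fun acc y => acc * y) 1
          else b)
       else b)
      = if gvalB scores props kn m parts > b then gvalB scores props kn m parts else b := by
    intro b parts hb
    by_cases hall : (PySem.List.slice (totalsB scores props kn m parts) none (some (-1))).all
        (fun t => decide (t > 0)) = true
    · rw [if_pos hall, gvalB]
      simp only [hall, if_true]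
    · rw [if_neg hall, gvalB]
      simp only [hall, Bool.false_eq_true, if_false]
      rw [if_neg (by omega)]
  rw [mfold]
  apply foldl_inv_congr (fun b => 0 ≤ b) _ _ best l hb
  intro b parts hmem hPb
  refine ⟨hstep b parts hPb, ?_⟩
  dsimp only
  split <;> omega

-- the main correspondence: A's recursion = mfold of gvalB over the compositions
lemma main_lemma (ing : List (String × List Int)) :
    ∀ (scores : List Int) (tbsp : Int), ing ≠ [] →
    (ing.head?.map (fun h => h.2.length)).getD 0 ≤ scores.length →
    List.IsChain (fun x y => y.2.length ≤ x.2.length) ing →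
    0 ≤ 100 - tbsp →
    2 ≤ (ing.getLast?.map (fun h => h.2.length)).getD 0 →
    get_score_1 ing scores tbsp =
      mfold (gvalB scores (ing.map (fun p => p.2)) ing.length
          ((ing.getLast?.map (fun h => h.2.length)).getD 0))
        0 (compositions (100 - tbsp) ing.length) := by
  induction ing with
  | nil => intro _ _ hne _ _ _ _; exact absurd rfl hne
  | cons hd tl ih =>
    intro scores tbsp _ hhead hchain hrem hlast
    simp only [List.head?_cons, Option.map_some, Option.getD_some] at hhead
    rw [A_cons, bf2, tw_nonneg tbsp hrem]
    cases tl with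
    | nil =>
      simp only [List.getLast?_singleton, Option.map_some, Option.getD_some, List.map_cons,
        List.map_nil, List.length_cons, List.length_nil, Nat.zero_add] at hlast ⊢
      by_cases hle : 100 - tbsp ≤ 100
      · rw [show min (100 - tbsp) 100 = 100 - tbsp from min_eq_left hle,
          show compositions (100 - tbsp) 1 = [[100 - tbsp]] from by
            unfold compositions; rw [if_pos hle],
          PySem.List.pyRange_one_succ_right hrem, mfold_append,
          mfold_zero _ _ (by
            intro a ha
            rw [PySem.List.mem_pyRange_one] at ha
            unfold get_score_1
            rw [if_neg]
            rintro ⟨h1, -⟩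
            omega),
          mfold_cons, mfold_cons, mfold_nil, mfold_nil]
        have hkey : get_score_1 [] (updS scores hd.2 (100 - tbsp)) (tbsp + (100 - tbsp)) =
            gvalB scores [hd.2] 1 hd.2.length [100 - tbsp] := by
          unfold get_score_1 gvalB
          rw [show tbsp + (100 - tbsp) = 100 from by ring,
            show (1 : Nat) = 0 + 1 from rfl,
            totalsB_shift scores hd.2 [] 0 hd.2.length (100 - tbsp) [] (le_refl _) hhead,
            totalsB_nil _ _ (length_updS scores hd.2 (100 - tbsp)).symm]
          simp only [true_and]
          rw [PySem.List.slice_to_neg_one]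
          cases hc : (updS scores hd.2 (100 - tbsp)).dropLast with
          | nil =>
            exfalso
            have h1 := congrArg List.length hc
            rw [List.length_dropLast, length_updS] at h1
            simp at h1
            omega
          | cons x ys =>
            exact if_congr Iff.rfl
              (by
                show List.foldl (fun acc y => acc * y) x ys = _
                rw [List.foldl_cons, one_mul]) rfl
        rw [hkey]
      · rw [min_eq_right (by omega),
          show compositions (100 - tbsp) 1 = [] from by
            unfold compositions; rw [if_neg hle],
          mfold_nil]
        apply mfold_zero
        intro a ha
        rw [PySem.List.mem_pyRange_one] at ha
        unfold get_score_1
        rw [if_neg]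
        rintro ⟨h1, -⟩
        omega
    | cons hd2 tl2 =>
      rw [List.isChain_cons_cons] at hchain
      obtain ⟨hrel, hchain2⟩ := hchain
      simp only [List.getLast?_cons_cons, List.length_cons, List.map_cons] at hlast ⊢
      have hMle : (((hd2 :: tl2).getLast?).map (fun h => h.2.length)).getD 0 ≤ hd2.2.length :=
        chain_last_le tl2 hd2 hchain2
      rw [compositions_succ (100 - tbsp) (tl2.length + 1) (by omega), mfold_flatMap]
      conv_lhs => unfold mfold
      apply foldl_inv_congr (fun b : Int => 0 ≤ b) _ _ _ _ (le_refl (0 : Int))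
      intro b a hmem hPb
      rw [PySem.List.mem_pyRange_one] at hmem
      have iha := ih (updS scores hd.2 a) (tbsp + a) (by simp)
        (by
          simp only [List.head?_cons, Option.map_some, Option.getD_some, length_updS]
          exact hrel)
        hchain2 (by omega) hlast
      simp only [List.length_cons, List.map_cons] at iha
      rw [show (100 - (tbsp + a)) = (100 - tbsp - a) from by ring] at iha
      have gshift : ∀ parts ∈ compositions (100 - tbsp - a) (tl2.length + 1),
          gvalB scores (hd.2 :: hd2.2 :: tl2.map (fun p => p.2)) (tl2.length + 1 + 1)
            ((((hd2 :: tl2).getLast?).map (fun h => h.2.length)).getD 0) (a :: parts) =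
          gvalB (updS scores hd.2 a) (hd2.2 :: tl2.map (fun p => p.2)) (tl2.length + 1)
            ((((hd2 :: tl2).getLast?).map (fun h => h.2.length)).getD 0) parts := by
        intro parts _
        unfold gvalB
        rw [totalsB_shift scores hd.2 (hd2.2 :: tl2.map (fun p => p.2)) (tl2.length + 1) _ a
          parts (le_trans hMle hrel) hhead]
      constructor
      · rw [mfold_map, mfold_congr b _ gshift, mfold_init _ b _ hPb, ← iha]
        dsimp only
        split <;> omega
      · rw [mfold_map, mfold_congr b _ gshift, mfold_init _ b _ hPb]
        exact le_trans hPb (le_max_left _ _)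

-- ===== VERDICT (by name: the statement is the Claim_ definition above) =====
theorem get_score_1_spec : Claim_equal_get_score_1 := by
  intro ing scores tbsp hDom hPre
  unfold Spec_get_score_1
  obtain ⟨h1, h2, h3⟩ := hPre
  cases ing with
  | nil =>
    unfold get_score_1 get_score_1_alt
    rfl
  | cons hd tl =>
    have hlen0 : ¬ ((hd :: tl).length = 0) := by simp
    by_cases hneg : 100 - tbsp < 0
    · rw [A_neg hd tl scores tbsp hneg]
      unfold get_score_1_alt
      rw [if_neg hlen0, if_pos (Or.inl hneg)]
    · by_cases hbig : 100 - tbsp > 100 * (((hd :: tl).length : Nat) : Int)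
      · rw [A_zero (hd :: tl) scores tbsp (by omega)]
        unfold get_score_1_alt
        rw [if_neg hlen0, if_pos (Or.inr hbig)]
      · have htb : tbsp ≤ 100 := by omega
        obtain ⟨hh, hchain⟩ := h1 htb (by simp)
        have hl := h3 (by simp) (by omega) htb
        unfold get_score_1_alt
        rw [if_neg hlen0, if_neg (by omega :
          ¬ (100 - tbsp < 0 ∨ 100 - tbsp > 100 * (((hd :: tl).length : Nat) : Int)))]
        rw [B_fold scores ((hd :: tl).map (fun p => p.2)) (hd :: tl).length
          (PySem.List.pyGetD (hd :: tl) (-1) ("", [])).2.length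
          (compositions (100 - tbsp) (hd :: tl).length) 0 (le_refl 0)]
        rw [show (PySem.List.pyGetD (hd :: tl) (-1) ("", [])).2.length =
            (((hd :: tl).getLast?).map (fun h => h.2.length)).getD 0 from by
          rw [PySem.List.pyGetD_neg_one (h := by simp),
            List.getLast?_eq_some_getLast (h := by simp)]
          simp]
        exact main_lemma (hd :: tl) scores tbsp (by simp) hh hchain (by omega) hl
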